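-- pv_equiv track=rewrite | github.com/ppatali/AdventCode2021 | day10.py | FindAutoCompletes
-- ===== SOURCE A (Python) =====
-- from typing import List, Tuple, Dict, Set
--
-- BRACKETS = {"(": ")", "[": "]", "{": "}", "<": ">"}
--
-- def FindAutoCompletes(lines: List[str]) -> List[str]:
--     autocompletes = []
--     for line in lines:
--         stack = []
--         corrupted = False
--         for c in line:
--             if c in BRACKETS.keys():
--                 stack.append(c)
--             elif len(stack) == 0:
--                 corrupted = True
--                 break
--             elif BRACKETS[stack.pop()] != c:
--                 corrupted = True
--
--         if corrupted:
--             continue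
--
--         autocompletes.append("".join([BRACKETS[c] for c in reversed(stack)]))
--
--     return autocompletes
-- ===== SOURCE B (Python) =====
-- from typing import List
--
-- PAIRS = {"(": ")", "[": "]", "{": "}", "<": ">"}
--
-- def FindAutoCompletes(lines: List[str]) -> List[str]:
--     # Rewrite each line to its normal form by cancelling adjacent matched
--     # pairs; the line is corrupted iff anything other than an opener remains.
--     autocompletes = []
--     for line in lines:
--         chars = list(line)
--         i = 0
--         while i + 1 < len(chars):
--             if chars[i] in PAIRS and PAIRS[chars[i]] == chars[i + 1]:
--                 chars = chars[:i] + chars[i + 2:]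
--                 i = i - 1 if i > 0 else 0
--             else:
--                 i += 1
--         if all(c in PAIRS for c in chars):
--             autocompletes.append("".join(PAIRS[c] for c in reversed(chars)))
--     return autocompletes
-- ===== Notes on version B (the rewrite author's own statement) =====
-- stated objective: alternative
-- what changed: Replaces the stack scan with term rewriting: each line is reduced to a normal form by repeatedly deleting adjacent matched bracket pairs, the line is kept iff only openers remain, and the completion is the reversed closers of that residue.
import Mathlib
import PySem

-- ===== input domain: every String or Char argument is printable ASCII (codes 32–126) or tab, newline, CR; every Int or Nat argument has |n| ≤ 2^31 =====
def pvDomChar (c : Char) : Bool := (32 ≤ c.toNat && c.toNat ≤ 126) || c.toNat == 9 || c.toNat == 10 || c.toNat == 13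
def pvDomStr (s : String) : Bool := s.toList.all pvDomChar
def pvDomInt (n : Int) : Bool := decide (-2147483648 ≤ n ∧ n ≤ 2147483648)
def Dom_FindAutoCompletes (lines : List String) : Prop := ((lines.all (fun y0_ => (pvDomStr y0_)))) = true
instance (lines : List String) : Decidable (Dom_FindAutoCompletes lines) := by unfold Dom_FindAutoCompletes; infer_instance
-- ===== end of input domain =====

-- B rewrites each line to a normal form by cancelling adjacent matched pairs instead of A's stack scan (alternative decomposition, no speed claim).

-- ===== PORT A =====
-- BRACKETS = {"(": ")", "[": "]", "{": "}", "<": ">"}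
def pvBrackets : PySem.Dict Char Char :=
  PySem.Dict.ofList [('(', ')'), ('[', ']'), ('{', '}'), ('<', '>')]

-- the inner 'for c in line' loop: state (stack, corrupted); the empty-stack branch breaks.
-- BRACKETS[stack.pop()] cannot raise (stack holds only keys), so getD's default is unreachable.
def pvGoA : List Char → List Char → Bool → Bool × List Char
  | [], stack, corrupted => (corrupted, stack)
  | c :: rest, stack, corrupted =>
    if pvBrackets.contains c then pvGoA rest (c :: stack) corrupted
    else match stack with
      | [] => (true, stack)
      | t :: s => pvGoA rest s (corrupted || !(pvBrackets.getD t '?' == c))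

def FindAutoCompletes (lines : List String) : List String :=
  lines.foldl (fun autocompletes line =>
    let r := pvGoA line.toList [] false
    if r.1 then autocompletes
    else autocompletes ++ [String.ofList (r.2.map (fun c => pvBrackets.getD c '?'))]) []

-- ===== PORT B =====
-- B's PAIRS is the same literal dict; membership 'c in PAIRS' and lookup 'PAIRS[c]' are
-- ported exactly as these two total functions on the four keys.
def pvIsOpen (c : Char) : Bool := c = '(' || c = '[' || c = '{' || c = '<'

def pvClose (c : Char) : Char :=
  if c = '(' then ')' else if c = '[' then ']' else if c = '{' then '}'
  else if c = '<' then '>' else '?'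

-- the 'while i + 1 < len(chars)' loop of B: delete the pair at i or advance
def pvReduce (chars : List Char) (i : Nat) : List Char :=
  if h : i + 1 < chars.length then
    if pvIsOpen chars[i] && pvClose chars[i] == chars[i + 1] then
      pvReduce (chars.take i ++ chars.drop (i + 2)) (i - 1)
    else pvReduce chars (i + 1)
  else chars
termination_by 3 * chars.length - i
decreasing_by
  · simp only [List.length_append, List.length_take, List.length_drop]; omega
  · omega

def FindAutoCompletes_alt (lines : List String) : List String :=
  lines.foldl (fun autocompletes line =>
    let chars := pvReduce line.toList 0
    if chars.all pvIsOpen then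
      autocompletes ++ [String.ofList (chars.reverse.map pvClose)]
    else autocompletes) []

-- ===== PRECONDITION & SPEC =====
def Spec_FindAutoCompletes (lines : List String) (out : List String) : Prop := out = FindAutoCompletes_alt lines
instance (lines : List String) (out : List String) : Decidable (Spec_FindAutoCompletes lines out) := by unfold Spec_FindAutoCompletes; infer_instance

-- ===== CLAIM (what is proved, stated in full; the proofs are below) =====
def Claim_equal_FindAutoCompletes : Prop := ∀ (lines : List String), Dom_FindAutoCompletes lines → Spec_FindAutoCompletes lines (FindAutoCompletes lines)

-- ===== LEMMAS AND PROOFS =====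

-- reference stack machine: none = the line is corrupted at some point
def pvRun : List Char → List Char → Option (List Char)
  | [], st => some st
  | c :: cs, st =>
    if pvIsOpen c then pvRun cs (c :: st)
    else match st with
      | [] => none
      | t :: s => if pvClose t = c then pvRun cs s else none

lemma pvBrackets_mk :
    pvBrackets = PySem.Dict.mk [('(', ')'), ('[', ']'), ('{', '}'), ('<', '>')] := by decide

lemma pvContains_eq (c : Char) : pvBrackets.contains c = pvIsOpen c := by
  rw [pvBrackets_mk]
  simp only [PySem.Dict.contains_mk, pvIsOpen]
  apply Bool.eq_iff_iff.mpr
  simp only [List.any_cons, List.any_nil, Bool.or_eq_true, beq_iff_eq, decide_eq_true_eq,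
    Bool.false_eq_true, or_false]
  tauto

lemma pvGetD_eq (c : Char) : pvBrackets.getD c '?' = pvClose c := by
  by_cases h1 : c = '('
  · subst h1; decide
  by_cases h2 : c = '['
  · subst h2; decide
  by_cases h3 : c = '{'
  · subst h3; decide
  by_cases h4 : c = '<'
  · subst h4; decide
  rw [pvBrackets_mk]
  simp [PySem.Dict.getD, PySem.Dict.get?, pvClose, h1, h2, h3, h4,
    Ne.symm h1, Ne.symm h2, Ne.symm h3, Ne.symm h4]

lemma pvGoA_true (cs st : List Char) : (pvGoA cs st true).1 = true := by
  induction cs generalizing st with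
  | nil => simp [pvGoA]
  | cons c rest ih =>
    simp only [pvGoA]
    split
    · exact ih _
    · match st with
      | [] => rfl
      | t :: s => simpa using ih s

lemma pvGoA_run (cs : List Char) : ∀ st : List Char,
    match pvRun cs st with
    | some st' => pvGoA cs st false = (false, st')
    | none => (pvGoA cs st false).1 = true := by
  induction cs with
  | nil => intro st; simp [pvRun, pvGoA]
  | cons c rest ih =>
    intro st
    simp only [pvRun, pvGoA, pvContains_eq]
    by_cases hop : pvIsOpen c = true
    · simp only [hop, if_true]
      exact ih (c :: st)
    · simp only [Bool.not_eq_true] at hop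
      simp only [hop, Bool.false_eq_true, if_false]
      match st with
      | [] => simp
      | t :: s =>
        simp only [pvGetD_eq]
        by_cases hcl : pvClose t = c
        · simp only [hcl, if_true, beq_self_eq_true, Bool.not_true, Bool.or_false]
          exact ih s
        · have : (pvClose t == c) = false := by simpa using hcl
          simp only [hcl, if_false, this, Bool.not_false, Bool.or_true]
          exact pvGoA_true rest s

lemma pvRun_append (xs ys st : List Char) :
    pvRun (xs ++ ys) st = (pvRun xs st).bind (fun st' => pvRun ys st') := by
  induction xs generalizing st with
  | nil => simp [pvRun]
  | cons c rest ih =>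
    simp only [List.cons_append, pvRun]
    split
    · exact ih _
    · match st with
      | [] => rfl
      | t :: s =>
        by_cases hc : pvClose t = c
        · simp only [hc, if_true]
          exact ih s
        · simp [hc]

lemma pvOpen_cases {c : Char} (h : pvIsOpen c = true) :
    c = '(' ∨ c = '[' ∨ c = '{' ∨ c = '<' := by
  have h' := h
  simp only [pvIsOpen, Bool.or_eq_true, decide_eq_true_eq] at h'
  tauto

lemma pvRun_pair {c : Char} (h : pvIsOpen c = true) (st : List Char) :
    pvRun [c, pvClose c] st = some st := by
  rcases pvOpen_cases h with h | h | h | h <;> subst h <;> simp [pvRun, pvClose, pvIsOpen]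

def pvNoPair (l : List Char) : Prop :=
  ∀ (j : Nat) (c d : Char), l[j]? = some c → l[j + 1]? = some d →
    pvIsOpen c = true → pvClose c ≠ d

lemma pvSurgery (chars : List Char) (i : Nat) (h : i + 1 < chars.length)
    (hop : pvIsOpen chars[i] = true) (hcl : pvClose chars[i] = chars[i + 1]) (st : List Char) :
    pvRun (chars.take i ++ chars.drop (i + 2)) st = pvRun chars st := by
  conv_rhs => rw [← List.take_append_drop i chars]
  have hd : chars.drop i = chars[i] :: chars[i + 1] :: chars.drop (i + 2) := by
    rw [List.drop_eq_getElem_cons (by omega), List.drop_eq_getElem_cons (by omega)]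
  rw [hd, pvRun_append, pvRun_append]
  congr 1
  funext st'
  have h2 : chars[i] :: chars[i + 1] :: chars.drop (i + 2) =
      [chars[i], pvClose chars[i]] ++ chars.drop (i + 2) := by simp [hcl]
  rw [h2, pvRun_append, pvRun_pair hop st']
  rfl

lemma pvReduce_spec (chars : List Char) (i : Nat) :
    (∀ (j : Nat) (c d : Char), j + 1 ≤ i → chars[j]? = some c →
      chars[j + 1]? = some d → pvIsOpen c = true → pvClose c ≠ d) →
    pvNoPair (pvReduce chars i) ∧ ∀ st, pvRun (pvReduce chars i) st = pvRun chars st := by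
  induction chars, i using pvReduce.induct with
  | case1 chars i h hpair ih =>
    intro hyp
    have hop : pvIsOpen chars[i] = true := by
      simpa using (Bool.and_eq_true_iff.mp hpair).1
    have hcl : pvClose chars[i] = chars[i + 1] := by
      have := (Bool.and_eq_true_iff.mp hpair).2
      simpa using this
    rw [pvReduce, dif_pos h, if_pos hpair]
    have hlen : i ≤ chars.length := by omega
    have hyp' : ∀ (j : Nat) (c d : Char), j + 1 ≤ i - 1 →
        (chars.take i ++ chars.drop (i + 2))[j]? = some c →
        (chars.take i ++ chars.drop (i + 2))[j + 1]? = some d →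
        pvIsOpen c = true → pvClose c ≠ d := by
      intro j c d hj hg1 hg2 hopn
      have hjlt : j + 1 < i := by omega
      have e1 : (chars.take i ++ chars.drop (i + 2))[j]? = chars[j]? := by
        rw [List.getElem?_append_left (by simp; omega), List.getElem?_take_of_lt (by omega)]
      have e2 : (chars.take i ++ chars.drop (i + 2))[j + 1]? = chars[j + 1]? := by
        rw [List.getElem?_append_left (by simp; omega), List.getElem?_take_of_lt (by omega)]
      exact hyp j c d (by omega) (e1 ▸ hg1) (e2 ▸ hg2) hopn
    obtain ⟨hnp, hruns⟩ := ih hyp'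
    refine ⟨hnp, fun st => ?_⟩
    rw [hruns st, pvSurgery chars i h hop hcl st]
  | case2 chars i h hpair ih =>
    intro hyp
    rw [pvReduce, dif_pos h, if_neg hpair]
    apply ih
    intro j c d hj hg1 hg2 hopn
    rcases Nat.lt_or_ge (j + 1) (i + 1) with hlt | hge
    · exact hyp j c d (by omega) hg1 hg2 hopn
    · have hji : j = i := by omega
      subst hji
      have e1 : chars[j]? = some chars[j] := List.getElem?_eq_getElem (by omega)
      have e2 : chars[j + 1]? = some chars[j + 1] := List.getElem?_eq_getElem (by omega)
      rw [e1] at hg1; rw [e2] at hg2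
      obtain rfl : chars[j] = c := by injection hg1
      obtain rfl : chars[j + 1] = d := by injection hg2
      intro hcl
      exact hpair (by simp [hopn, hcl])
  | case3 chars i h =>
    intro hyp
    rw [pvReduce, dif_neg h]
    refine ⟨?_, fun st => rfl⟩
    intro j c d hg1 hg2 hopn
    have hjlt : j + 1 < chars.length := (List.getElem?_eq_some_iff.mp hg2).1
    exact hyp j c d (by omega) hg1 hg2 hopn

lemma pvKey (r : List Char) : ∀ p : List Char, p.all pvIsOpen = true → pvNoPair (p ++ r) →
    pvRun r p.reverse = if r.all pvIsOpen then some (r.reverse ++ p.reverse) else none := by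
  induction r with
  | nil => intro p _ _; simp [pvRun]
  | cons c rest ih =>
    intro p hall hnp
    by_cases hop : pvIsOpen c = true
    · have hstep : pvRun (c :: rest) p.reverse = pvRun rest ((p ++ [c]).reverse) := by
        simp [pvRun, hop]
      rw [hstep, ih (p ++ [c]) (by simp_all) (by simpa using hnp)]
      by_cases hr : rest.all pvIsOpen = true
      · simp [hr, hop]
      · simp [hr, hop]
    · have hallfalse : (c :: rest).all pvIsOpen = false := by
        simp [List.all_cons, hop]
      rw [hallfalse]
      simp only [Bool.false_eq_true, if_false]
      rcases List.eq_nil_or_concat p with hp | ⟨q, t, hp⟩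
      · subst hp; simp [pvRun, hop]
      · subst hp
        rw [List.concat_eq_append] at *
        have htop : pvIsOpen t = true := by
          have := List.all_eq_true.mp hall t (by simp)
          simpa using this
        have hget1 : (q ++ [t] ++ c :: rest)[q.length]? = some t := by
          rw [List.append_assoc, List.getElem?_append_right (by omega)]
          simp
        have hget2 : (q ++ [t] ++ c :: rest)[q.length + 1]? = some c := by
          rw [List.append_assoc, List.getElem?_append_right (by omega)]
          simp
        have hne : pvClose t ≠ c := hnp q.length t c hget1 hget2 htop
        simp [pvRun, hop, List.reverse_append, hne]

lemma pvStep_eq (acc : List String) (line : String) :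
    (let r := pvGoA line.toList [] false
     if r.1 then acc else acc ++ [String.ofList (r.2.map (fun c => pvBrackets.getD c '?'))]) =
    (let chars := pvReduce line.toList 0
     if chars.all pvIsOpen then acc ++ [String.ofList (chars.reverse.map pvClose)] else acc) := by
  set l := line.toList with hl
  set r := pvReduce l 0 with hr
  obtain ⟨hnp, hruns⟩ := pvReduce_spec l 0 (fun j c d hj _ _ _ => by omega)
  have hkey := pvKey r [] (by simp) (by simpa using hnp)
  have hrun : pvRun l [] = if r.all pvIsOpen then some r.reverse else none := by
    rw [← hruns []]
    simpa using hkey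
  have hA := pvGoA_run l []
  by_cases hall : r.all pvIsOpen = true
  · rw [hall] at hrun
    simp only [if_true] at hrun
    rw [hrun] at hA
    simp only at hA
    rw [hA]
    simp [hall, pvGetD_eq]
  · rw [Bool.eq_false_iff.mpr hall] at hrun
    simp only [Bool.false_eq_true, if_false] at hrun
    rw [hrun] at hA
    simp only at hA
    simp [hA, Bool.eq_false_iff.mpr hall]

-- ===== VERDICT (by name: the statement is the Claim_ definition above) =====
theorem FindAutoCompletes_spec : Claim_equal_FindAutoCompletes := by
  intro lines _
  unfold Spec_FindAutoCompletes FindAutoCompletes FindAutoCompletes_alt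
  have h := funext (fun acc => funext (fun line => pvStep_eq acc line))
  rw [h]
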